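-- pv_equiv track=rewrite | github.com/ciudadanointeligente/indice2016 | parser.py | get_desgloce
-- ===== SOURCE A (Python) =====
-- def get_desgloce(line, starting_index, dimension, column_numbers):
-- 	line_ = line[starting_index + 1:]
-- 	result = {}
-- 	counter = 1
-- 	for col in line_:
--
-- 		if counter + starting_index in column_numbers:
-- 			break
-- 		result[dimension+'_'+ str(counter)] = col
-- 		counter += 1
-- 	return result
-- ===== SOURCE B (Python) =====
-- def get_desgloce(line, starting_index, dimension, column_numbers):
--     line_ = line[starting_index + 1:]
--     offsets = [c - starting_index for c in column_numbers
--                if 0 < c - starting_index <= len(line_)]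
--     stop = min(offsets) - 1 if offsets else len(line_)
--     return {dimension + '_' + str(i): col
--             for i, col in enumerate(line_[:stop], start=1)}
-- ===== Notes on version B (the rewrite author's own statement) =====
-- stated objective: alternative
-- what changed: Instead of scanning columns one by one with a per-column membership test in column_numbers, B computes the stop index once as the minimum of the in-window entries of column_numbers and builds the dict by one comprehension over the enumerated slice.
import Mathlib
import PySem

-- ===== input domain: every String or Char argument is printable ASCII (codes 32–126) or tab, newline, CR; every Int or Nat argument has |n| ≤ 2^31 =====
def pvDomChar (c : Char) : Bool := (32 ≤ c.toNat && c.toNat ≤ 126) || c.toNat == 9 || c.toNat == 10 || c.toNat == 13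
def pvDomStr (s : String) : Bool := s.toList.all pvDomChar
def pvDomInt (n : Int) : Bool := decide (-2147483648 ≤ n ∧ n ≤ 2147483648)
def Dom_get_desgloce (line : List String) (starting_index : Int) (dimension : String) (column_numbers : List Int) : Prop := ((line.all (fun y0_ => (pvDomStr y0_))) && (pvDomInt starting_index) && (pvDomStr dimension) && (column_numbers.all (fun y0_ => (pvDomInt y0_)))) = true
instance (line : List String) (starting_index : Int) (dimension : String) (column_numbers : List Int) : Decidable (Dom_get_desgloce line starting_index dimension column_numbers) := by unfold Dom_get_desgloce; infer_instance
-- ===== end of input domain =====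

-- B replaces A's element-by-element scan (with a per-item membership test) by computing the
-- boundary arithmetically as a min over the filtered column_numbers and then mapping over one
-- enumerated slice; objective: alternative decomposition of the same computation.


-- ===== PORT A =====
-- the for-loop with its break, counter and dict accumulator
def pvDesgloceLoop (si : Int) (dim : String) (cns : List Int) :
    List String → Int → PySem.Dict String String → PySem.Dict String String
  | [], _, result => result
  | col :: rest, counter, result =>
    if counter + si ∈ cns then result
    else pvDesgloceLoop si dim cns rest (counter + 1)
        (result.insert (dim ++ "_" ++ PySem.Int.toStr counter) col)

def get_desgloce (line : List String) (starting_index : Int) (dimension : String) (column_numbers : List Int) : List (String × String) :=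
  let line_ := PySem.List.slice line (some (starting_index + 1)) none
  (pvDesgloceLoop starting_index dimension column_numbers line_ 1 PySem.Dict.empty).items

-- ===== PORT B =====
-- the dict comprehension's keys dimension+'_'+str(i) (i = 1,2,…) are pairwise distinct, so the
-- resulting dict, as an insertion-ordered association list, is exactly this map over enumerate
def get_desgloce_alt (line : List String) (starting_index : Int) (dimension : String) (column_numbers : List Int) : List (String × String) :=
  let line_ := PySem.List.slice line (some (starting_index + 1)) none
  let offsets := (column_numbers.filter
      (fun c => decide (0 < c - starting_index) && decide (c - starting_index ≤ (line_.length : Int)))).map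
      (fun c => c - starting_index)
  let stop : Int := match PySem.List.min? offsets (fun x => x) with
    | some m => m - 1
    | none => (line_.length : Int)
  (PySem.List.enumerate (PySem.List.slice line_ none (some stop)) 1).map
    (fun p => (dimension ++ "_" ++ PySem.Int.toStr p.1, p.2))

-- ===== PRECONDITION & SPEC =====
def Spec_get_desgloce (line : List String) (starting_index : Int) (dimension : String) (column_numbers : List Int) (out : List (String × String)) : Prop := out = get_desgloce_alt line starting_index dimension column_numbers
instance (line : List String) (starting_index : Int) (dimension : String) (column_numbers : List Int) (out : List (String × String)) : Decidable (Spec_get_desgloce line starting_index dimension column_numbers out) := by unfold Spec_get_desgloce; infer_instance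

-- ===== CLAIM (what is proved, stated in full; the proofs are below) =====
def Claim_equal_get_desgloce : Prop := ∀ (line : List String) (starting_index : Int) (dimension : String) (column_numbers : List Int), Dom_get_desgloce line starting_index dimension column_numbers → Spec_get_desgloce line starting_index dimension column_numbers (get_desgloce line starting_index dimension column_numbers)

-- ===== LEMMAS AND PROOFS =====

-- decimal decoding, used to show str(n) is injective on nonnegative n
def pvVal : List Char → Nat
  | [] => 0
  | c :: cs => (c.toNat - 48) * 10 ^ cs.length + pvVal cs

theorem pvVal_append_singleton (l : List Char) (c : Char) :
    pvVal (l ++ [c]) = pvVal l * 10 + (c.toNat - 48) := by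
  induction l with
  | nil => simp [pvVal]
  | cons a t ih => simp [pvVal, ih, pow_succ]; ring

theorem pvToDigitsCore_append (f : Nat) : ∀ (n : Nat) (l : List Char),
    Nat.toDigitsCore 10 f n l = Nat.toDigitsCore 10 f n [] ++ l := by
  induction f with
  | zero => intro n l; simp [Nat.toDigitsCore]
  | succ f ih =>
    intro n l
    simp only [Nat.toDigitsCore]
    by_cases h : n / 10 = 0
    · simp [h]
    · simp only [h, if_false]
      rw [ih (n / 10) (Nat.digitChar (n % 10) :: l), ih (n / 10) [Nat.digitChar (n % 10)]]
      simp

theorem pvDigitChar_toNat (d : Nat) (h : d < 10) : (Nat.digitChar d).toNat = d + 48 := by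
  interval_cases d <;> decide

theorem pvVal_toDigitsCore (f : Nat) : ∀ (n : Nat), n < f →
    pvVal (Nat.toDigitsCore 10 f n []) = n := by
  induction f with
  | zero => intro n h; omega
  | succ f ih =>
    intro n h
    simp only [Nat.toDigitsCore]
    by_cases hd : n / 10 = 0
    · have h10 : n < 10 := by omega
      simp [hd, pvVal, pvDigitChar_toNat (n % 10) (Nat.mod_lt _ (by norm_num))]
      omega
    · have hlt : n / 10 < f := by
        have := Nat.div_lt_self (by omega : 0 < n) (by norm_num : 1 < 10)
        omega
      simp only [hd, if_false]
      rw [pvToDigitsCore_append, pvVal_append_singleton, ih (n / 10) hlt,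
        pvDigitChar_toNat (n % 10) (Nat.mod_lt _ (by norm_num))]
      omega

theorem pvToDigits_inj (m n : Nat) (h : Nat.toDigits 10 m = Nat.toDigits 10 n) : m = n := by
  have hm := pvVal_toDigitsCore (m + 1) m (Nat.lt_succ_self m)
  have hn := pvVal_toDigitsCore (n + 1) n (Nat.lt_succ_self n)
  unfold Nat.toDigits at h
  rw [h] at hm
  omega

theorem pvToStr_inj (m n : Int) (hm : 0 ≤ m) (hn : 0 ≤ n)
    (h : PySem.Int.toStr m = PySem.Int.toStr n) : m = n := by
  unfold PySem.Int.toStr PySem.Int.toChars at h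
  rw [if_neg (by omega), if_neg (by omega)] at h
  have h' := congrArg String.toList h
  simp only [String.toList_ofList] at h'
  have := pvToDigits_inj m.toNat n.toNat h'
  omega

theorem pvKey_inj (dim : String) (m n : Int) (hm : 0 ≤ m) (hn : 0 ≤ n)
    (h : dim ++ "_" ++ PySem.Int.toStr m = dim ++ "_" ++ PySem.Int.toStr n) : m = n := by
  apply pvToStr_inj m n hm hn
  have h' := congrArg String.toList h
  simp only [String.toList_append, List.append_assoc] at h'
  exact String.toList_inj.mp (List.append_cancel_left (List.append_cancel_left h'))

-- number of columns A copies before breaking, starting at counter k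
def pvCnt (si : Int) (cns : List Int) : List String → Int → Nat
  | [], _ => 0
  | _ :: rest, k => if k + si ∈ cns then 0 else pvCnt si cns rest (k + 1) + 1

theorem pvCnt_le (si : Int) (cns : List Int) : ∀ (xs : List String) (k : Int),
    pvCnt si cns xs k ≤ xs.length := by
  intro xs
  induction xs with
  | nil => intro k; simp [pvCnt]
  | cons x r ih =>
    intro k
    simp only [pvCnt, List.length_cons]
    split_ifs with h
    · omega
    · have := ih (k + 1); omega


theorem pvCnt_no_break (si : Int) (cns : List Int) : ∀ (xs : List String) (k : Int) (i : Nat),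
    i < pvCnt si cns xs k → (k + (i : Int) + si) ∉ cns := by
  intro xs
  induction xs with
  | nil => intro k i h; simp [pvCnt] at h
  | cons x r ih =>
    intro k i h
    simp only [pvCnt] at h
    split_ifs at h with hb
    · omega
    · cases i with
      | zero => simpa using hb
      | succ j =>
        have := ih (k + 1) j (by omega)
        have e : k + ((j + 1 : Nat) : Int) + si = k + 1 + (j : Int) + si := by push_cast; ring
        rwa [e]

theorem pvCnt_break (si : Int) (cns : List Int) : ∀ (xs : List String) (k : Int),
    pvCnt si cns xs k < xs.length → (k + (pvCnt si cns xs k : Int) + si) ∈ cns := by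
  intro xs
  induction xs with
  | nil => intro k h; simp [pvCnt] at h
  | cons x r ih =>
    intro k h
    simp only [pvCnt, List.length_cons] at h ⊢
    split_ifs with hb
    · simpa using hb
    · rw [if_neg hb] at h
      have := ih (k + 1) (by omega)
      have e : k + ((pvCnt si cns r (k + 1) + 1 : Nat) : Int) + si
          = k + 1 + (pvCnt si cns r (k + 1) : Int) + si := by push_cast; ring
      rwa [e]

-- the loop, started on a dict containing no key with index ≥ k, appends one pair per copied column
theorem pvLoop_items (si : Int) (dim : String) (cns : List Int) :
    ∀ (xs : List String) (k : Int) (d : PySem.Dict String String), 0 < k →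
    (∀ j : Int, k ≤ j → d.contains (dim ++ "_" ++ PySem.Int.toStr j) = false) →
    (pvDesgloceLoop si dim cns xs k d).items =
      d.items ++ (PySem.List.enumerate (xs.take (pvCnt si cns xs k)) k).map
        (fun p => (dim ++ "_" ++ PySem.Int.toStr p.1, p.2)) := by
  intro xs
  induction xs with
  | nil => intro k d hk hd; simp [pvDesgloceLoop, pvCnt]
  | cons x r ih =>
    intro k d hk hd
    simp only [pvDesgloceLoop, pvCnt]
    split_ifs with hb
    · simp
    · have hfresh : d.contains (dim ++ "_" ++ PySem.Int.toStr k) = false := hd k le_rfl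
      rw [ih (k + 1) _ (by omega) ?_]
      · rw [PySem.Dict.items_insert_of_not_contains _ _ hfresh]
        simp [PySem.List.enumerate_cons, List.take_succ_cons]
      · intro j hj
        rw [PySem.Dict.contains_insert]
        have hne : (dim ++ "_" ++ PySem.Int.toStr j) ≠ (dim ++ "_" ++ PySem.Int.toStr k) := by
          intro he
          have := pvKey_inj dim j k (by omega) (by omega) he
          omega
        simp [hne, hd j (by omega)]

-- pvCnt at k = 1 equals the arithmetic stop index B computes
theorem pvCnt_eq_stop (si : Int) (cns : List Int) (xs : List String) :
    (pvCnt si cns xs 1 : Int) =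
      (match PySem.List.min? ((cns.filter
          (fun c => decide (0 < c - si) && decide (c - si ≤ (xs.length : Int)))).map
          (fun c => c - si)) (fun x => x) with
        | some m => m - 1
        | none => (xs.length : Int)) := by
  set offsets := (cns.filter
      (fun c => decide (0 < c - si) && decide (c - si ≤ (xs.length : Int)))).map
      (fun c => c - si) with hoff
  have hle := pvCnt_le si cns xs 1
  cases hmin : PySem.List.min? offsets (fun x => x) with
  | none =>
    -- no admissible break column: the loop runs to the end
    have hempty : offsets = [] := (PySem.List.min?_eq_none_iff _ _).mp hmin
    simp only []
    by_contra hne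
    have hlt : pvCnt si cns xs 1 < xs.length := by omega
    have hbr := pvCnt_break si cns xs 1 hlt
    have : (1 + (pvCnt si cns xs 1 : Int) + si) - si ∈ offsets := by
      rw [hoff]
      refine List.mem_map.mpr ⟨_, List.mem_filter.mpr ⟨hbr, ?_⟩, rfl⟩
      simp only [Bool.and_eq_true, decide_eq_true_eq]
      constructor <;> omega
    rw [hempty] at this
    simp at this
  | some m =>
    have hmem := PySem.List.min?_mem hmin
    have hmins := PySem.List.min?_isMin hmin
    -- m = c - si for an admissible c, so 0 < m ≤ len and counter m breaks
    obtain ⟨c, hc, hcm⟩ := List.mem_map.mp (hoff ▸ hmem)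
    obtain ⟨hcns, hwin⟩ := List.mem_filter.mp hc
    simp only [Bool.and_eq_true, decide_eq_true_eq] at hwin
    simp only []
    -- pvCnt ≥ m - 1 : no break strictly before m
    -- pvCnt ≤ m - 1 : break at m if reached
    by_contra hne
    rcases lt_trichotomy ((pvCnt si cns xs 1 : Int)) (m - 1) with hlt | heq | hgt
    · have hlt' : pvCnt si cns xs 1 < xs.length := by omega
      have hbr := pvCnt_break si cns xs 1 hlt'
      have hmem2 : (1 + (pvCnt si cns xs 1 : Int) + si) - si ∈ offsets := by
        rw [hoff]
        refine List.mem_map.mpr ⟨_, List.mem_filter.mpr ⟨hbr, ?_⟩, rfl⟩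
        simp only [Bool.and_eq_true, decide_eq_true_eq]
        constructor <;> omega
      have := hmins _ hmem2
      simp only [] at this
      omega
    · exact hne heq
    · -- i := m - 1 < pvCnt, but counter 1 + i = m breaks
      have hi : ((m - 1).toNat : Int) = m - 1 := by omega
      have := pvCnt_no_break si cns xs 1 (m - 1).toNat (by omega)
      rw [hi] at this
      have e : 1 + (m - 1) + si = c := by omega
      rw [e] at this
      exact this hcns

-- ===== VERDICT (by name: the statement is the Claim_ definition above) =====
theorem get_desgloce_spec : Claim_equal_get_desgloce := by
  intro line si dim cns _
  unfold Spec_get_desgloce get_desgloce get_desgloce_alt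
  simp only []
  set line_ := PySem.List.slice line (some (si + 1)) none with hline
  have hloop := pvLoop_items si dim cns line_ 1 PySem.Dict.empty (by norm_num)
    (fun j _ => by simp [PySem.Dict.contains, PySem.Dict.empty])
  rw [hloop]
  have hstop := pvCnt_eq_stop si cns line_
  rw [← hstop]
  rw [PySem.List.slice_to_natCast]
  simp [PySem.Dict.empty]
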